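-- pv_equiv track=rewrite | github.com/ryan-worley/CS221-HW | sentiment/helpful.py | findSingletonWords
-- ===== SOURCE A (Python) =====
-- import collections
--
-- def findSingletonWords(text):
--     """
--     Splits the string |text| by whitespace and returns the set of words that
--     occur exactly once.
--     You might find it useful to use collections.defaultdict(int).
--     """
--     # BEGIN_YOUR_CODE (our solution is 4 lines of code, but don't worry if you deviate from this)
--     lst = []
--     d = collections.defaultdict(int)
--
--     # Split words at whitespace, create dict of words
--     for word in text.split():
--         d[word] += 1
--
--     # Word word in dict,
--     for word in d:
--         if d[word] == 1:
--             lst.append(word)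
--
--     return set(lst)
-- ===== SOURCE B (Python) =====
-- def findSingletonWords(text):
--     """
--     Splits the string |text| by whitespace and returns the set of words that
--     occur exactly once.
--     """
--     # One pass with two sets: words seen at least once, and words seen again.
--     seen, dup = set(), set()
--     for word in text.split():
--         if word in seen:
--             dup.add(word)
--         else:
--             seen.add(word)
--     return seen - dup
-- ===== Notes on version B (the rewrite author's own statement) =====
-- stated objective: alternative
-- what changed: Replaces the frequency dictionary plus a second filtering loop over its keys with a single pass maintaining two sets (seen and seen-again) and returning their set difference.
import Mathlib
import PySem

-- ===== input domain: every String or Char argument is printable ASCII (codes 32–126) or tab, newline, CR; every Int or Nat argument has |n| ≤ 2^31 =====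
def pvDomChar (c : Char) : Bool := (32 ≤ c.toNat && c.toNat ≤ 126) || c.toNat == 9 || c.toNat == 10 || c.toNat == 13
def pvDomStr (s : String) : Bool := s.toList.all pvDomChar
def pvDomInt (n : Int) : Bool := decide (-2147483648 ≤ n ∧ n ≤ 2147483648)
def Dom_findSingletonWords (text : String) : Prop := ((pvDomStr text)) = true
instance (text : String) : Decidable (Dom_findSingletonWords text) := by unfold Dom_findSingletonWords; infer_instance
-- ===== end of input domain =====

-- B replaces the frequency dictionary + second key loop with a single pass over the
-- words keeping two sets (seen, seen-again) and returning their set difference (objective: alternative).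

-- ===== PORT A =====
def findSingletonWords (text : String) : List String :=
  let d : PySem.Dict String Int :=
    (PySem.Str.split₀ text).foldl (fun d word => d.modify word 0 (· + 1)) PySem.Dict.empty
  let lst : List String :=
    (PySem.Dict.keys d).foldl (fun lst word => if d.getD word 0 = 1 then lst ++ [word] else lst) []
  PySem.Set.ofList lst

-- ===== PORT B =====
-- B's loop body: 'if word in seen: dup.add(word) else: seen.add(word)' on the pair (seen, dup)
def stepB (p : PySem.Set String × PySem.Set String) (word : String) :
    PySem.Set String × PySem.Set String :=
  if PySem.Set.contains p.1 word then (p.1, PySem.Set.add p.2 word)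
  else (PySem.Set.add p.1 word, p.2)

def findSingletonWords_alt (text : String) : List String :=
  let p : PySem.Set String × PySem.Set String :=
    (PySem.Str.split₀ text).foldl stepB (PySem.Set.empty, PySem.Set.empty)
  PySem.Set.diff p.1 p.2

-- ===== PRECONDITION & SPEC =====
def Spec_findSingletonWords (text : String) (out : List String) : Prop := out = findSingletonWords_alt text
instance (text : String) (out : List String) : Decidable (Spec_findSingletonWords text out) := by unfold Spec_findSingletonWords; infer_instance

-- ===== CLAIM (what is proved, stated in full; the proofs are below) =====
def Claim_equal_findSingletonWords : Prop := ∀ (text : String), Dom_findSingletonWords text → Spec_findSingletonWords text (findSingletonWords text)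

-- ===== LEMMAS AND PROOFS =====

-- B's loop: the first set collects every word (first occurrences in order), the second
-- set's members are exactly the words that were already in `seen` when met again.
theorem loopB_spec (l : List String) (s t : PySem.Set String) :
    (l.foldl
      stepB (s, t)).1 = l.foldl PySem.Set.add s ∧
    ∀ w, w ∈ (l.foldl
      stepB (s, t)).2 ↔ w ∈ t ∨ (w ∈ l ∧ w ∈ s) ∨ 2 ≤ l.count w := by
  induction l generalizing s t with
  | nil => simp
  | cons a l ih =>
    rw [List.foldl_cons, List.foldl_cons]
    by_cases h : PySem.Set.contains s a = true
    · have ha : a ∈ s := by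
        have := h
        simp only [PySem.Set.contains, List.contains_iff_mem] at this
        exact this
      have hadd : PySem.Set.add s a = s := by
        unfold PySem.Set.add
        rw [if_pos h]
      have hstep : stepB (s, t) a = (s, PySem.Set.add t a) := by
        unfold stepB
        rw [if_pos h]
      rw [hstep, hadd]
      refine ⟨(ih s (PySem.Set.add t a)).1, fun w => ?_⟩
      rw [(ih s (PySem.Set.add t a)).2 w, PySem.Set.mem_add]
      by_cases hw : w = a
      · subst hw
        simp [ha]
      · simp [hw, Ne.symm hw]
    · have ha : a ∉ s := by
        intro hm
        exact h (by simp only [PySem.Set.contains, List.contains_iff_mem]; exact hm)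
      have hstep : stepB (s, t) a = (PySem.Set.add s a, t) := by
        unfold stepB
        rw [if_neg h]
      rw [hstep]
      refine ⟨(ih (PySem.Set.add s a) t).1, fun w => ?_⟩
      rw [(ih (PySem.Set.add s a) t).2 w]
      by_cases hw : w = a
      · subst hw
        by_cases hm : w ∈ l
        · have hc : 0 < l.count w := List.count_pos_iff.mpr hm
          simp [ha, hm]
        · have hc : l.count w = 0 := List.count_eq_zero.mpr hm
          simp [ha, hm, hc]
      · simp [PySem.Set.mem_add, hw, Ne.symm hw]

-- A's second loop is a filter of the counter's keys by count = 1.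
theorem lstA_spec (ws : List String) :
    (PySem.Dict.keys (PySem.Dict.counter ws)).foldl
        (fun lst word => if (PySem.Dict.counter ws).getD word 0 = 1 then lst ++ [word] else lst) [] =
      (PySem.Set.ofList ws).filter (fun word => decide ((PySem.Dict.counter ws).getD word 0 = 1)) := by
  have h := PySem.List.foldl_append_if
      (fun word => decide ((PySem.Dict.counter ws).getD word 0 = 1)) (fun x => x)
      (PySem.Dict.keys (PySem.Dict.counter ws)) []
  simp only [decide_eq_true_eq, List.map_id', List.nil_append] at h
  rw [h, PySem.Dict.keys_counter]

theorem main_eq (text : String) : findSingletonWords text = findSingletonWords_alt text := by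
  show PySem.Set.ofList
      ((PySem.Dict.keys (PySem.Dict.counter (PySem.Str.split₀ text))).foldl
        (fun lst word =>
          if (PySem.Dict.counter (PySem.Str.split₀ text)).getD word 0 = 1 then lst ++ [word] else lst) [])
    = PySem.Set.diff
        ((PySem.Str.split₀ text).foldl
          stepB (PySem.Set.empty, PySem.Set.empty)).1
        ((PySem.Str.split₀ text).foldl
          stepB (PySem.Set.empty, PySem.Set.empty)).2
  set ws := PySem.Str.split₀ text with hws
  have hB := loopB_spec ws PySem.Set.empty PySem.Set.empty
  have h1 : (ws.foldl
      stepB (PySem.Set.empty, PySem.Set.empty)).1 = PySem.Set.ofList ws := by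
    rw [hB.1, PySem.Set.ofList_eq_foldl]; rfl
  rw [lstA_spec ws]
  unfold PySem.Set.diff
  rw [h1]
  rw [PySem.Set.ofList_eq_self_of_nodup _ ((PySem.Set.nodup_ofList ws).filter _)]
  apply List.filter_congr
  intro w hw
  have hmem : w ∈ ws := (PySem.Set.mem_ofList ws w).mp hw
  have hc1 : 1 ≤ ws.count w := List.count_pos_iff.mpr hmem
  have h2 : (w ∈ (ws.foldl stepB (PySem.Set.empty, PySem.Set.empty)).2) ↔ 2 ≤ ws.count w := by
    rw [hB.2 w]
    show w ∈ ([] : List String) ∨ (w ∈ ws ∧ w ∈ ([] : List String)) ∨ 2 ≤ ws.count w ↔ _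
    constructor
    · rintro (h | ⟨-, h⟩ | h)
      · cases h
      · cases h
      · exact h
    · exact fun h => Or.inr (Or.inr h)
  show decide ((PySem.Dict.counter ws).getD w 0 = 1) = _
  rw [Bool.eq_iff_iff]
  simp only [decide_eq_true_eq, Bool.not_eq_true', ← Bool.not_eq_true]
  rw [PySem.Dict.getD_counter]
  simp only [PySem.Set.contains, List.contains_iff_mem, h2]
  constructor
  · intro hcast
    have : ws.count w = 1 := by exact_mod_cast hcast
    omega
  · intro hnot
    have : ws.count w = 1 := by omega
    exact_mod_cast this

-- ===== VERDICT (by name: the statement is the Claim_ definition above) =====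
theorem findSingletonWords_spec : Claim_equal_findSingletonWords := by
  intro text _
  unfold Spec_findSingletonWords
  exact main_eq text
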